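-- pv_equiv track=rewrite | github.com/wwwyo/atcoder | contest/abc218/c.py | search
-- ===== SOURCE A (Python) =====
-- def search(arr):
--     top = len(arr)
--     left = len(arr)
--     for i in range(len(arr)):
--         if '#' in arr[i]:
--             top = i
--             left = arr[i].index('#')
--             return top, left
-- ===== SOURCE B (Python) =====
-- def search(arr):
--     hashes = [(i, j) for i, row in enumerate(arr) for j, c in enumerate(row) if c == '#']
--     if hashes:
--         return min(hashes)
-- ===== Notes on version B (the rewrite author's own statement) =====
-- stated objective: alternative
-- what changed: Instead of scanning rows with early return via 'in'/.index, B builds the full list of all '#' coordinates with one comprehension and returns its lexicographic minimum (the first '#' in row-major order), collect-then-reduce with no early exit.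
import Mathlib
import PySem

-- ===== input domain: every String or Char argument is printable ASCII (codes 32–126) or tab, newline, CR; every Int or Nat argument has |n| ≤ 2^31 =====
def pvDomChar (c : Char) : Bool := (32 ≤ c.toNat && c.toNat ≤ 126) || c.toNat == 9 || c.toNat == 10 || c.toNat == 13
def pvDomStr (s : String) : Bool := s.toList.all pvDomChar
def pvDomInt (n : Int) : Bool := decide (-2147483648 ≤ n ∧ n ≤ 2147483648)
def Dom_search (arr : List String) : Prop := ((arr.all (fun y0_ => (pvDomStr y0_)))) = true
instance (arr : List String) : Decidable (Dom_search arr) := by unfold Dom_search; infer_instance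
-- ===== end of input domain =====

-- B replaces A's early-return row scan by a comprehension collecting every '#' coordinate
-- followed by the lexicographic minimum (alternative decomposition, same asymptotic cost).

-- ===== PORT A =====
-- the for-loop over range(len(arr)) with early return, as structural recursion carrying the index i
def searchLoopA : List String → Int → Option (Int × Int)
  | [], _ => none
  | s :: rest, i =>
    if PySem.Str.isIn "#" s then some (i, PySem.Str.find s "#")
    else searchLoopA rest (i + 1)

def search (arr : List String) : Option (Int × Int) := searchLoopA arr 0

-- ===== PORT B =====
-- hashes = [(i, j) for i, row in enumerate(arr) for j, c in enumerate(row) if c == '#']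
def hashesB (arr : List String) : List (Int × Int) :=
  (PySem.List.enumerate arr).flatMap (fun ir =>
    (PySem.List.enumerate ir.2.toList).filterMap (fun jc =>
      if jc.2 = '#' then some (ir.1, jc.1) else none))

-- return min(hashes) if hashes else fall off the end (None); min on tuples is min2?
def search_alt (arr : List String) : Option (Int × Int) :=
  PySem.List.min2? (hashesB arr) (fun p => p.1) (fun p => p.2)

-- ===== PRECONDITION & SPEC =====
def Spec_search (arr : List String) (out : Option (Int × Int)) : Prop := out = search_alt arr
instance (arr : List String) (out : Option (Int × Int)) : Decidable (Spec_search arr out) := by unfold Spec_search; infer_instance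

-- ===== CLAIM (what is proved, stated in full; the proofs are below) =====
def Claim_equal_search : Prop := ∀ (arr : List String), Dom_search arr → Spec_search arr (search arr)

-- ===== LEMMAS AND PROOFS =====

-- proof-side recursive characterisation of one row's comprehension
def rowAux (i : Int) : Int → List Char → List (Int × Int)
  | _, [] => []
  | j, c :: cs => if c = '#' then (i, j) :: rowAux i (j + 1) cs else rowAux i (j + 1) cs

-- proof-side recursive characterisation of the whole comprehension, row offset i
def posFrom : List String → Int → List (Int × Int)
  | [], _ => []
  | s :: rest, i => rowAux i 0 s.toList ++ posFrom rest (i + 1)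

-- first scan of a row, carried index: none = no '#'
def innerLoopB : List Char → Int → Option Int
  | [], _ => none
  | c :: cs, j => if c = '#' then some j else innerLoopB cs (j + 1)

theorem row_filterMap_eq_rowAux (i : Int) (cs : List Char) (j : Int) :
    (PySem.List.enumerate cs j).filterMap (fun jc =>
      if jc.2 = '#' then some (i, jc.1) else none) = rowAux i j cs := by
  induction cs generalizing j with
  | nil => simp [PySem.List.enumerate_nil, rowAux]
  | cons c cs ih =>
    rw [PySem.List.enumerate_cons]
    by_cases hc : c = '#' <;> simp [rowAux, hc, ih]

theorem hashesB_eq_posFrom (arr : List String) (i : Int) :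
    (PySem.List.enumerate arr i).flatMap (fun ir =>
      (PySem.List.enumerate ir.2.toList).filterMap (fun jc =>
        if jc.2 = '#' then some (ir.1, jc.1) else none)) = posFrom arr i := by
  induction arr generalizing i with
  | nil => simp [PySem.List.enumerate_nil, posFrom]
  | cons s rest ih =>
    rw [PySem.List.enumerate_cons]
    simp only [List.flatMap_cons, posFrom, ih]
    rw [row_filterMap_eq_rowAux]

theorem rowAux_mem (i j : Int) (cs : List Char) :
    ∀ x ∈ rowAux i j cs, x.1 = i ∧ j ≤ x.2 := by
  induction cs generalizing j with
  | nil => simp [rowAux]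
  | cons c cs ih =>
    intro x hx
    by_cases hc : c = '#'
    · simp only [rowAux, if_pos hc, List.mem_cons] at hx
      rcases hx with rfl | hx
      · exact ⟨rfl, le_refl _⟩
      · have := ih (j + 1) x hx; exact ⟨this.1, by omega⟩
    · simp only [rowAux, if_neg hc] at hx
      have := ih (j + 1) x hx; exact ⟨this.1, by omega⟩

theorem posFrom_mem (arr : List String) (i : Int) :
    ∀ x ∈ posFrom arr i, i ≤ x.1 := by
  induction arr generalizing i with
  | nil => simp [posFrom]
  | cons s rest ih =>
    intro x hx
    simp only [posFrom, List.mem_append] at hx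
    rcases hx with hx | hx
    · exact le_of_eq (rowAux_mem i 0 s.toList x hx).1.symm
    · have := ih (i + 1) x hx; omega

theorem rowAux_head_min (i j : Int) (cs : List Char) (a : Int × Int) (rest : List (Int × Int))
    (h : rowAux i j cs = a :: rest) :
    a.1 = i ∧ j ≤ a.2 ∧ ∀ x ∈ rest, x.1 = i ∧ a.2 < x.2 := by
  induction cs generalizing j with
  | nil => simp [rowAux] at h
  | cons c cs ih =>
    by_cases hc : c = '#'
    · simp only [rowAux, if_pos hc, List.cons.injEq] at h
      obtain ⟨rfl, rfl⟩ := h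
      refine ⟨rfl, le_refl _, fun x hx => ?_⟩
      have := rowAux_mem i (j + 1) cs x hx
      exact ⟨this.1, by omega⟩
    · simp only [rowAux, if_neg hc] at h
      obtain ⟨h1, h2, h3⟩ := ih (j + 1) h
      exact ⟨h1, by omega, h3⟩

theorem posFrom_head_min (arr : List String) (i : Int) (a : Int × Int) (rest : List (Int × Int))
    (h : posFrom arr i = a :: rest) :
    i ≤ a.1 ∧ ∀ x ∈ rest, a.1 < x.1 ∨ (a.1 = x.1 ∧ a.2 < x.2) := by
  induction arr generalizing i with
  | nil => simp [posFrom] at h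
  | cons s arr' ih =>
    simp only [posFrom] at h
    cases hr : rowAux i 0 s.toList with
    | nil =>
      rw [hr, List.nil_append] at h
      obtain ⟨h1, h2⟩ := ih (i + 1) h
      exact ⟨by omega, h2⟩
    | cons b r =>
      rw [hr, List.cons_append] at h
      injection h with h1 h2
      subst h1
      subst h2
      obtain ⟨hb1, _, hb3⟩ := rowAux_head_min i 0 s.toList _ r hr
      refine ⟨le_of_eq hb1.symm, fun x hx => ?_⟩
      rcases List.mem_append.mp hx with hx | hx
      · obtain ⟨hx1, hx2⟩ := hb3 x hx
        exact Or.inr ⟨by omega, hx2⟩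
      · have := posFrom_mem arr' (i + 1) x hx
        exact Or.inl (by omega)

theorem min2?_of_head_min (a : Int × Int) (rest : List (Int × Int))
    (h : ∀ x ∈ rest, a.1 < x.1 ∨ (a.1 = x.1 ∧ a.2 < x.2)) :
    PySem.List.min2? (a :: rest) (fun p => p.1) (fun p => p.2) = some a := by
  unfold PySem.List.min2?
  simp only [List.foldl_cons]
  induction rest with
  | nil => rfl
  | cons x r ih =>
    have hx := h x (List.mem_cons_self ..)
    have hcond : (decide (x.1 < a.1) || !decide (a.1 < x.1) && decide (x.2 < a.2)) = false := by
      rcases hx with h1 | ⟨h1, h2⟩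
      · have hn1 : ¬ x.1 < a.1 := by omega
        simp [hn1, h1]
      · have hn1 : ¬ x.1 < a.1 := by omega
        have hn2 : ¬ x.2 < a.2 := by omega
        simp [hn1, hn2]
    simp only [List.foldl_cons, hcond, Bool.false_eq_true, reduceIte]
    exact ih (fun y hy => h y (List.mem_cons_of_mem _ hy))

-- the inner scan vs Python's '#' in s / s.index('#')
theorem innerLoopB_eq_index? (cs : List Char) (j : Int) :
    innerLoopB cs j = (PySem.List.index? cs '#').map (fun k : Nat => j + (k : Int)) := by
  induction cs generalizing j with
  | nil => simp [innerLoopB, PySem.List.index?]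
  | cons c cs ih =>
    by_cases hc : c = '#'
    · subst hc
      rw [PySem.List.index?_cons_self]
      simp [innerLoopB]
    · rw [PySem.List.index?_cons_of_ne cs hc]
      simp only [innerLoopB, if_neg hc, ih]
      cases h : PySem.List.index? cs '#' <;> simp
      omega

theorem singleton_prefix_iff {α : Type} (a : α) (l : List α) :
    [a] <+: l ↔ l[0]? = some a := by
  cases l with
  | nil => simp
  | cons x xs =>
    constructor
    · rintro ⟨t, ht⟩
      simp at ht
      simp [ht.1]
    · intro h
      simp at h
      exact ⟨xs, by simp [h]⟩

theorem isIn_iff_index?_isSome (cs : List Char) :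
    PySem.Chars.isIn ['#'] cs = true ↔ (PySem.List.index? cs '#').isSome := by
  rw [PySem.Chars.isIn_iff_infix, PySem.List.index?_isSome_iff]
  constructor
  · intro h
    exact h.subset (by simp)
  · intro h
    obtain ⟨pre, suf, rfl⟩ := List.append_of_mem h
    exact ⟨pre, suf, by simp⟩

theorem find_eq_index? (cs : List Char) (k : Nat) (h : PySem.List.index? cs '#' = some k) :
    PySem.Chars.find cs ['#'] = (k : Int) := by
  obtain ⟨hk, hget, hmin⟩ := PySem.List.getElem_of_index?_eq_some h
  have hmem : '#' ∈ cs := List.mem_of_getElem hget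
  have hinf : ['#'] <:+: cs := by
    obtain ⟨pre, suf, rfl⟩ := List.mem_iff_append.1 hmem
    exact ⟨pre, suf, by simp⟩
  have hnn : 0 ≤ PySem.Chars.find cs ['#'] := (PySem.Chars.find_nonneg_iff _ _).2 hinf
  obtain ⟨hpre, hminf⟩ := PySem.Chars.find_spec hnn
  set m := (PySem.Chars.find cs ['#']).toNat with hm
  have hmk : m = k := by
    have hmlt : m < cs.length := by
      have := hpre.length_le
      simp at this
      by_contra hge
      have : cs.drop m = [] := List.drop_eq_nil_of_le (Nat.le_of_not_lt hge)
      rw [this] at hpre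
      simpa using hpre.length_le
    have hcm : cs[m] = '#' := by
      have h2 := (singleton_prefix_iff '#' (cs.drop m)).1 hpre
      rw [List.getElem?_drop, List.getElem?_eq_getElem (by omega : m + 0 < cs.length)] at h2
      simpa using h2
    rcases lt_trichotomy m k with hlt | heq | hgt
    · exact absurd hcm (hmin m hlt)
    · exact heq
    · exfalso
      apply hminf k hgt
      rw [singleton_prefix_iff, List.getElem?_drop]
      simp only [Nat.add_zero]
      rw [List.getElem?_eq_getElem hk]
      simp [hget]
  omega

theorem perString (s : String) :
    innerLoopB s.toList 0 = if PySem.Str.isIn "#" s then some (PySem.Str.find s "#") else none := by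
  rw [innerLoopB_eq_index?]
  have hbr : PySem.Str.isIn "#" s = PySem.Chars.isIn ['#'] s.toList := by
    simp [PySem.Str.isIn_eq]
  have hfr : PySem.Str.find s "#" = PySem.Chars.find s.toList ['#'] := by
    simp [PySem.Str.find_eq]
  by_cases h : PySem.Str.isIn "#" s
  · have hsome : (PySem.List.index? s.toList '#').isSome := by
      rw [← isIn_iff_index?_isSome, ← hbr]; exact h
    obtain ⟨k, hk⟩ := Option.isSome_iff_exists.1 hsome
    rw [if_pos h, hk, hfr, find_eq_index? _ _ hk]
    simp
  · have hnone : PySem.List.index? s.toList '#' = none := by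
      by_contra hne
      exact h (hbr ▸ ((isIn_iff_index?_isSome s.toList).2 (Option.isSome_iff_ne_none.2 hne)))
    rw [if_neg h, hnone]
    rfl

theorem rowAux_head? (i j : Int) (cs : List Char) :
    (rowAux i j cs).head? = (innerLoopB cs j).map (fun k => (i, k)) := by
  induction cs generalizing j with
  | nil => rfl
  | cons c cs ih =>
    by_cases hc : c = '#' <;> simp [rowAux, innerLoopB, hc, ih]

theorem searchLoopA_eq_head (arr : List String) (i : Int) :
    searchLoopA arr i = (posFrom arr i).head? := by
  induction arr generalizing i with
  | nil => rfl
  | cons s rest ih =>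
    have hrow : (rowAux i 0 s.toList).head? =
        if PySem.Str.isIn "#" s then some (i, PySem.Str.find s "#") else none := by
      rw [rowAux_head?, perString]
      by_cases h : PySem.Str.isIn "#" s <;> simp
    simp only [searchLoopA, posFrom]
    cases hr : rowAux i 0 s.toList with
    | nil =>
      rw [hr] at hrow
      simp only [List.head?_nil] at hrow
      rw [if_neg (by by_contra h; rw [if_pos (by simpa using h)] at hrow; simp at hrow)]
      simpa using ih (i + 1)
    | cons b r =>
      rw [hr] at hrow
      simp only [List.head?_cons] at hrow
      by_cases h : PySem.Str.isIn "#" s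
      · rw [if_pos h] at hrow ⊢
        have hb : b = (i, PySem.Str.find s "#") := Option.some.inj hrow
        subst hb
        simp
      · rw [if_neg h] at hrow; simp at hrow

-- ===== VERDICT (by name: the statement is the Claim_ definition above) =====
theorem search_spec : Claim_equal_search := by
  intro arr _
  unfold Spec_search search search_alt hashesB
  rw [hashesB_eq_posFrom, searchLoopA_eq_head]
  cases h : posFrom arr 0 with
  | nil => rfl
  | cons a rest =>
    obtain ⟨_, hmin⟩ := posFrom_head_min arr 0 a rest h
    rw [min2?_of_head_min a rest hmin]
    rfl
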